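-- pv_equiv track=rewrite | github.com/nasokST/shumencoin | miner_py/shumnecoint_miner.py | isDifficultyValid
-- ===== SOURCE A (Python) =====
-- def isDifficultyValid(hash: str, difficulty: int):
--     hash_difficulty_count: int = 0;
--
--     if hash == None:
--         return False
--
--     i = 0
--     while i < len(hash):
--         if hash[i] != '0':
--             break
--
--         hash_difficulty_count += 1
--         i+=1
--
--     if hash_difficulty_count < difficulty:
--         return False
--
--     return True
-- ===== SOURCE B (Python) =====
-- def isDifficultyValid(hash: str, difficulty: int):
--     if hash == None:
--         return False
--     if difficulty <= 0:
--         return True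
--     return len(hash) >= difficulty and set(hash[:difficulty]) == {'0'}
-- ===== Notes on version B (the rewrite author's own statement) =====
-- stated objective: alternative
-- what changed: Instead of scanning characters and accumulating a leading-zero counter that is then compared with the threshold, B slices off the first `difficulty` characters and compares their character set with {'0'} (after a length check), with an immediate True for non-positive difficulty.
import Mathlib
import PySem

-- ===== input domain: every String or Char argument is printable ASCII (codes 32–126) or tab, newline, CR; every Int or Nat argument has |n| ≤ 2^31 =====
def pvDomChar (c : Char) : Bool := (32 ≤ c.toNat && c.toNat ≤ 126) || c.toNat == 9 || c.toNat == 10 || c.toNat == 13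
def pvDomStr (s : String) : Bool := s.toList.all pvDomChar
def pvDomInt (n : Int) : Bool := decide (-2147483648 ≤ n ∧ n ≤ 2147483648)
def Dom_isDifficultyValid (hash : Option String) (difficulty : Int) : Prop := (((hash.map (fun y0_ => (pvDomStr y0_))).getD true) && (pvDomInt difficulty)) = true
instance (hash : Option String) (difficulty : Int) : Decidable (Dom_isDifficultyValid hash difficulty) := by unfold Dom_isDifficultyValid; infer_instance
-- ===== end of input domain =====

-- B replaces A's counter-accumulating scan with a slice of the first `difficulty` characters compared as a set with {'0'}.
-- ===== PORT A =====
-- while-loop scanning leading '0' characters, incrementing a counter, breaking at the first non-'0'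
def pvCountLZ : List Char → Int
  | [] => 0
  | c :: rest => if c ≠ '0' then 0 else 1 + pvCountLZ rest

def isDifficultyValid (hash : Option String) (difficulty : Int) : Bool :=
  match hash with
  | none => false
  | some h =>
      let hash_difficulty_count := pvCountLZ h.toList
      if hash_difficulty_count < difficulty then false else true

-- ===== PORT B =====
def isDifficultyValid_alt (hash : Option String) (difficulty : Int) : Bool :=
  match hash with
  | none => false
  | some h =>
      if difficulty ≤ 0 then true
      else
        decide (difficulty ≤ (PySem.Str.len h : Int)) &&
          PySem.Set.equal
            (PySem.Set.ofList (PySem.List.slice h.toList none (some difficulty)))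
            (PySem.Set.ofList ['0'])

-- ===== PRECONDITION & SPEC =====
def Spec_isDifficultyValid (hash : Option String) (difficulty : Int) (out : Bool) : Prop := out = isDifficultyValid_alt hash difficulty
instance (hash : Option String) (difficulty : Int) (out : Bool) : Decidable (Spec_isDifficultyValid hash difficulty out) := by unfold Spec_isDifficultyValid; infer_instance

-- ===== CLAIM (what is proved, stated in full; the proofs are below) =====
def Claim_equal_isDifficultyValid : Prop := ∀ (hash : Option String) (difficulty : Int), Dom_isDifficultyValid hash difficulty → Spec_isDifficultyValid hash difficulty (isDifficultyValid hash difficulty)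

-- ===== LEMMAS AND PROOFS =====
theorem pvCountLZ_nonneg (l : List Char) : 0 ≤ pvCountLZ l := by
  induction l with
  | nil => simp [pvCountLZ]
  | cons c rest ih => simp only [pvCountLZ]; split <;> omega

theorem replicate_prefix_iff (l : List Char) (n : Nat) :
    List.replicate n '0' <+: l ↔ (n : Int) ≤ pvCountLZ l := by
  induction l generalizing n with
  | nil =>
    cases n with
    | zero => simp [pvCountLZ]
    | succ m => simp [pvCountLZ, List.replicate]
  | cons c rest ih =>
    cases n with
    | zero => simpa [pvCountLZ] using pvCountLZ_nonneg (c :: rest)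
    | succ m =>
      rw [List.replicate_succ, List.cons_prefix_cons]
      by_cases hc : c = '0'
      · rw [show pvCountLZ (c :: rest) = 1 + pvCountLZ rest from by simp [pvCountLZ, hc]]
        simp [hc, ih]; omega
      · rw [show pvCountLZ (c :: rest) = 0 from by simp [pvCountLZ, hc]]
        constructor
        · rintro ⟨h0, -⟩; exact absurd h0.symm hc
        · intro hle; exfalso; omega

theorem take_all_zero_iff (l : List Char) (n : Nat) (hn : 0 < n) :
    (n ≤ l.length ∧ ∀ c ∈ l.take n, c = '0') ↔ List.replicate n '0' <+: l := by
  constructor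
  · rintro ⟨hlen, hall⟩
    have htake : l.take n = List.replicate n '0' := by
      rw [List.eq_replicate_iff]
      exact ⟨by simp [hlen], hall⟩
    exact htake ▸ List.take_prefix n l
  · intro hp
    have hlen : n ≤ l.length := by
      have := hp.length_le; simpa using this
    have htake : l.take n = List.replicate n '0' := by
      have := (List.prefix_iff_eq_take.mp hp)
      simpa using this.symm
    exact ⟨hlen, by rw [htake]; intro c hc; exact (List.eq_of_mem_replicate hc)⟩

theorem set_equal_singleton_iff (t : List Char) :
    PySem.Set.equal (PySem.Set.ofList t) (PySem.Set.ofList ['0']) = true ↔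
      (t ≠ [] ∧ ∀ c ∈ t, c = '0') := by
  rw [PySem.Set.equal_iff]
  constructor
  · intro h
    have h0 : '0' ∈ PySem.Set.ofList t := (h '0').mpr (by simp [PySem.Set.mem_ofList])
    refine ⟨by rintro rfl; simp [PySem.Set.mem_ofList] at h0, ?_⟩
    intro c hc
    have := (h c).mp (by simp [PySem.Set.mem_ofList, hc])
    simpa [PySem.Set.mem_ofList] using this
  · rintro ⟨hne, hall⟩ x
    simp only [PySem.Set.mem_ofList, List.mem_singleton]
    constructor
    · exact fun hx => hall x hx
    · rintro rfl
      obtain ⟨c, hc⟩ := List.exists_mem_of_ne_nil t hne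
      exact (hall c hc) ▸ hc

theorem isDifficultyValid_spec : Claim_equal_isDifficultyValid := by
  intro hash difficulty _
  unfold Spec_isDifficultyValid isDifficultyValid isDifficultyValid_alt
  cases hash with
  | none => rfl
  | some h =>
    simp only
    by_cases hd : difficulty ≤ 0
    · have : ¬ pvCountLZ h.toList < difficulty := by
        have := pvCountLZ_nonneg h.toList; omega
      simp [hd, this]
    · push_neg at hd
      have hdle : ¬ difficulty ≤ 0 := by omega
      set n := difficulty.toNat with hn
      have hnpos : 0 < n := by omega
      have hcast : (n : Int) = difficulty := Int.toNat_of_nonneg (by omega)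
      rw [if_neg hdle]
      have hslice : PySem.List.slice h.toList none (some difficulty) = h.toList.take n :=
        PySem.List.slice_to _ (by omega)
      rw [Bool.eq_iff_iff]
      simp only [Bool.and_eq_true, decide_eq_true_iff, PySem.Str.len_eq, hslice,
        set_equal_singleton_iff]
      have hlen : (h.length : Int) = (h.toList.length : Int) := by simp
      have hif : ((if pvCountLZ h.toList < difficulty then false else true) = true) ↔
          difficulty ≤ pvCountLZ h.toList := by
        by_cases hlt : pvCountLZ h.toList < difficulty <;> simp [hlt] <;> omega
      rw [hif]
      constructor
      · intro hnc
        have hcnt : (n : Int) ≤ pvCountLZ h.toList := by omega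
        have hp := (replicate_prefix_iff h.toList n).mpr hcnt
        obtain ⟨hl, hall⟩ := (take_all_zero_iff h.toList n hnpos).mpr hp
        refine ⟨by omega, ?_, hall⟩
        intro hnil
        have h0 := congrArg List.length hnil
        rw [List.length_take, List.length_nil] at h0
        omega
      · rintro ⟨hle, -, hall⟩
        have hl : n ≤ h.toList.length := by omega
        have hp := (take_all_zero_iff h.toList n hnpos).mp ⟨hl, hall⟩
        have := (replicate_prefix_iff h.toList n).mp hp
        omega
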